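-- pv_equiv track=rewrite | github.com/secure-foundations/SWISS | scripts/predicate_parsing.py | tokenize_cont
-- ===== SOURCE A (Python) =====
-- def tokenize_cont(c):
--   tokens = []
--   i = 0
--   while i < len(c):
--     if ('a' <= c[i] <= 'z') or ('A' <= c[i] <= 'Z'):
--       j = i + 1
--       while j < len(c) and (('a' <= c[j] <= 'z') or ('A' <= c[j] <= 'Z') or ('0' <= c[j] <= '9') or c[j] == '_'):
--         j += 1
--       tokens.append(c[i:j])
--       i = j
--     elif i+1 < len(c) and c[i] == '-' and c[i+1] == '>':
--       tokens.append('->')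
--       i += 2
--     elif i+1 < len(c) and c[i] == '~' and c[i+1] == '=':
--       tokens.append('~=')
--       i += 2
--     else:
--       tokens.append(c[i])
--       i += 1
--   return tokens
-- ===== SOURCE B (Python) =====
-- def _word(t):
--   return ('a' <= t[0] <= 'z') or ('A' <= t[0] <= 'Z')
--
-- def _cont(ch):
--   return ('a' <= ch <= 'z') or ('A' <= ch <= 'Z') or ('0' <= ch <= '9') or ch == '_'
--
-- def tokenize_cont(c):
--   tokens = []
--   for ch in c:
--     if tokens and _word(tokens[-1]) and _cont(ch):
--       tokens[-1] += ch
--     elif tokens and ((tokens[-1] == '-' and ch == '>') or (tokens[-1] == '~' and ch == '=')):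
--       tokens[-1] += ch
--     else:
--       tokens.append(ch)
--   return tokens
-- ===== Notes on version B (the rewrite author's own statement) =====
-- stated objective: alternative
-- what changed: Replaces A's index-based scan with a nested greedy identifier loop by a single character-at-a-time fold that either merges the character into the last token (identifier continuation, or completing '->'/'~=') or starts a new one-character token.
import Mathlib
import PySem

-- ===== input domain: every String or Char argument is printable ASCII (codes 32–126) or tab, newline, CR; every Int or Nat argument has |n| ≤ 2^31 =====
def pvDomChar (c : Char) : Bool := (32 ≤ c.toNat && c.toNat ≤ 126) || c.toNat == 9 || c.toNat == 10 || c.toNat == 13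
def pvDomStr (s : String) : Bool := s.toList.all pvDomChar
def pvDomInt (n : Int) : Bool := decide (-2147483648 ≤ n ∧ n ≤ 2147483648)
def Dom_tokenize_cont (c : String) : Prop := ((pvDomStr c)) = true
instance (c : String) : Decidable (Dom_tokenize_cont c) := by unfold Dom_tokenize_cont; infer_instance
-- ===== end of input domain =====

-- B replaces A's index scan (with a nested greedy identifier loop) by a single left fold that
-- either merges each character into the last token or starts a new one; alternative decomposition (not faster).

-- ===== PORT A =====
-- inner while loop: `while j < len(c) and (... c[j] is an identifier-continuation char ...): j += 1`
def pvAInner (s : List Char) (j : Nat) : Nat :=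
  if h : j < s.length then
    if ('a' ≤ s[j] ∧ s[j] ≤ 'z') ∨ ('A' ≤ s[j] ∧ s[j] ≤ 'Z') ∨ ('0' ≤ s[j] ∧ s[j] ≤ '9') ∨ s[j] = '_' then
      pvAInner s (j + 1)
    else j
  else j
termination_by s.length - j

-- termination fact cited by pvALoop's decreasing_by
theorem pvAInner_ge (s : List Char) (j : Nat) : j ≤ pvAInner s j := by
  unfold pvAInner
  split
  · split
    · exact Nat.le_trans (Nat.le_succ j) (pvAInner_ge s (j + 1))
    · exact Nat.le_refl j
  · exact Nat.le_refl j
termination_by s.length - j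

-- outer while loop of A, on the character list with the running index i
def pvALoop (s : List Char) (i : Nat) : List String :=
  if h : i < s.length then
    if ('a' ≤ s[i] ∧ s[i] ≤ 'z') ∨ ('A' ≤ s[i] ∧ s[i] ≤ 'Z') then
      -- j = the inner while's final index; append c[i:j]
      String.ofList (PySem.List.slice s (some (i : Int)) (some ((pvAInner s (i + 1) : Nat) : Int))) ::
        pvALoop s (pvAInner s (i + 1))
    else if h2 : i + 1 < s.length then
      if s[i] = '-' ∧ s[i + 1] = '>' then "->" :: pvALoop s (i + 2)
      else if s[i] = '~' ∧ s[i + 1] = '=' then "~=" :: pvALoop s (i + 2)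
      else String.ofList [s[i]] :: pvALoop s (i + 1)
    else String.ofList [s[i]] :: pvALoop s (i + 1)
  else []
termination_by s.length - i
decreasing_by all_goals (have := pvAInner_ge s (i + 1); omega)

def tokenize_cont (c : String) : List String := pvALoop c.toList 0

-- ===== PORT B =====
def pvIsAlpha (ch : Char) : Bool := decide (('a' ≤ ch ∧ ch ≤ 'z') ∨ ('A' ≤ ch ∧ ch ≤ 'Z'))

def pvIsCont (ch : Char) : Bool :=
  pvIsAlpha ch || decide ('0' ≤ ch ∧ ch ≤ '9') || ch == '_'

-- _word(t): the token's first character is a letter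
def pvIsWordTok (t : String) : Bool :=
  match t.toList with
  | ch :: _ => pvIsAlpha ch
  | [] => false

-- one iteration of B's `for ch in c` loop body
def pvBStep (tokens : List String) (ch : Char) : List String :=
  match tokens.getLast? with
  | some t =>
    if pvIsWordTok t && pvIsCont ch then tokens.dropLast ++ [t.push ch]
    else if (t == "-" && ch == '>') || (t == "~" && ch == '=') then tokens.dropLast ++ [t.push ch]
    else tokens ++ [String.ofList [ch]]
  | none => tokens ++ [String.ofList [ch]]

def tokenize_cont_alt (c : String) : List String := c.toList.foldl pvBStep []

-- ===== PRECONDITION & SPEC =====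
def Spec_tokenize_cont (c : String) (out : List String) : Prop := out = tokenize_cont_alt c
instance (c : String) (out : List String) : Decidable (Spec_tokenize_cont c out) := by unfold Spec_tokenize_cont; infer_instance

-- ===== CLAIM (what is proved, stated in full; the proofs are below) =====
def Claim_equal_tokenize_cont : Prop := ∀ (c : String), Dom_tokenize_cont c → Spec_tokenize_cont c (tokenize_cont c)

-- ===== LEMMAS AND PROOFS =====

-- reference tokenization by structural recursion on the suffix; both ports are proved equal to it
def pvTok : List Char → List String
  | [] => []
  | ch :: rest =>
    if pvIsAlpha ch = true then
      String.ofList (ch :: rest.takeWhile pvIsCont) :: pvTok (rest.dropWhile pvIsCont)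
    else if ch = '-' ∧ rest.head? = some '>' then "->" :: pvTok rest.tail
    else if ch = '~' ∧ rest.head? = some '=' then "~=" :: pvTok rest.tail
    else String.ofList [ch] :: pvTok rest
termination_by l => l.length
decreasing_by
  all_goals first
    | exact Nat.lt_succ_of_le (List.length_dropWhile_le _ _)
    | (simp [List.length_tail]; omega)
    | simp

theorem pvTok_nil : pvTok [] = [] := by
  rw [pvTok]

theorem pvTok_cons (ch : Char) (rest : List Char) :
    pvTok (ch :: rest) =
      (if pvIsAlpha ch = true then
        String.ofList (ch :: rest.takeWhile pvIsCont) :: pvTok (rest.dropWhile pvIsCont)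
      else if ch = '-' ∧ rest.head? = some '>' then "->" :: pvTok rest.tail
      else if ch = '~' ∧ rest.head? = some '=' then "~=" :: pvTok rest.tail
      else String.ofList [ch] :: pvTok rest) := by
  rw [pvTok]

theorem pvAlpha_iff (x : Char) :
    pvIsAlpha x = true ↔ (('a' ≤ x ∧ x ≤ 'z') ∨ ('A' ≤ x ∧ x ≤ 'Z')) := by
  simp [pvIsAlpha]

theorem pvCont_iff (x : Char) :
    pvIsCont x = true ↔
      (('a' ≤ x ∧ x ≤ 'z') ∨ ('A' ≤ x ∧ x ≤ 'Z') ∨ ('0' ≤ x ∧ x ≤ '9') ∨ x = '_') := by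
  simp [pvIsCont, pvIsAlpha]; tauto

theorem pvTake_takeWhile {α : Type} (p : α → Bool) (l : List α) :
    l.take (l.takeWhile p).length = l.takeWhile p := by
  induction l with
  | nil => rfl
  | cons a t ih => by_cases h : p a <;> simp [h, ih]

theorem pvDrop_takeWhile {α : Type} (p : α → Bool) (l : List α) :
    l.drop (l.takeWhile p).length = l.dropWhile p := by
  induction l with
  | nil => rfl
  | cons a t ih => by_cases h : p a <;> simp [h, ih]

theorem pvAInner_eq (s : List Char) (j : Nat) :
    pvAInner s j = j + ((s.drop j).takeWhile pvIsCont).length := by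
  unfold pvAInner
  split
  · next h =>
    rw [List.drop_eq_getElem_cons h, List.takeWhile_cons]
    split
    · next hc =>
      have hct : pvIsCont s[j] = true := (pvCont_iff _).mpr hc
      rw [pvAInner_eq s (j + 1), hct]
      simp
      omega
    · next hc =>
      have hcf : pvIsCont s[j] = false := by
        rw [← Bool.not_eq_true]; intro hb; exact hc ((pvCont_iff _).mp hb)
      rw [hcf]; simp
  · next h => simp [List.drop_eq_nil_of_le (le_of_not_gt h)]
termination_by s.length - j

theorem pvALoop_eq_tok (s : List Char) (i : Nat) : pvALoop s i = pvTok (s.drop i) := by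
  unfold pvALoop
  split
  · next h =>
    rw [List.drop_eq_getElem_cons h]
    by_cases ha : ('a' ≤ s[i] ∧ s[i] ≤ 'z') ∨ ('A' ≤ s[i] ∧ s[i] ≤ 'Z')
    · have ha' : pvIsAlpha s[i] = true := (pvAlpha_iff _).mpr ha
      rw [if_pos ha]
      have hj := pvAInner_eq s (i + 1)
      have hslice : PySem.List.slice s (some (i : Int)) (some ((pvAInner s (i + 1) : Nat) : Int))
          = s[i] :: (s.drop (i + 1)).takeWhile pvIsCont := by
        rw [PySem.List.slice_natCast, hj]
        have he : (i + 1) + ((s.drop (i + 1)).takeWhile pvIsCont).length - i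
            = ((s.drop (i + 1)).takeWhile pvIsCont).length + 1 := by omega
        rw [he, List.drop_eq_getElem_cons h, List.take_succ_cons, pvTake_takeWhile]
      have hdrop : s.drop (pvAInner s (i + 1)) = (s.drop (i + 1)).dropWhile pvIsCont := by
        rw [hj, ← pvDrop_takeWhile pvIsCont (s.drop (i + 1)), List.drop_drop]
      rw [hslice, pvALoop_eq_tok s (pvAInner s (i + 1)), hdrop, pvTok_cons, if_pos ha']
    · have ha' : pvIsAlpha s[i] = false := by
        rw [← Bool.not_eq_true, pvAlpha_iff]; exact ha
      rw [if_neg ha]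
      split
      · next h2 =>
        have hhd : (s.drop (i + 1)).head? = some s[i + 1] := by
          rw [List.head?_drop]; exact List.getElem?_eq_getElem h2
        have htl : (s.drop (i + 1)).tail = s.drop (i + 2) := by rw [List.tail_drop]
        split
        · next hc =>
          rw [pvALoop_eq_tok s (i + 2), pvTok_cons, if_neg (by simp [ha']),
            if_pos ⟨hc.1, by rw [hhd, hc.2]⟩, htl]
        · next hc1 =>
          have hne1 : ¬ (s[i] = '-' ∧ (s.drop (i + 1)).head? = some '>') := by
            rw [hhd]; rintro ⟨p, q⟩; exact hc1 ⟨p, by simpa using q⟩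
          split
          · next hc =>
            rw [pvALoop_eq_tok s (i + 2), pvTok_cons, if_neg (by simp [ha']),
              if_neg hne1, if_pos ⟨hc.1, by rw [hhd, hc.2]⟩, htl]
          · next hc2 =>
            have hne2 : ¬ (s[i] = '~' ∧ (s.drop (i + 1)).head? = some '=') := by
              rw [hhd]; rintro ⟨p, q⟩; exact hc2 ⟨p, by simpa using q⟩
            rw [pvALoop_eq_tok s (i + 1), pvTok_cons, if_neg (by simp [ha']),
              if_neg hne1, if_neg hne2]
      · next h2 =>
        have hnil : s.drop (i + 1) = [] := List.drop_eq_nil_of_le (by omega)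
        rw [pvALoop_eq_tok s (i + 1), hnil, pvTok_cons, if_neg (by simp [ha']),
          if_neg (by simp), if_neg (by simp)]
  · next h =>
    rw [List.drop_eq_nil_of_le (le_of_not_gt h), pvTok_nil]
termination_by s.length - i
decreasing_by all_goals (have := pvAInner_ge s (i + 1); omega)

-- the fold never merges into the last token of acc when this condition holds for the next char
def pvInert (acc : List String) (s : List Char) : Prop :=
  ∀ t ch r, acc.getLast? = some t → s = ch :: r →
    (pvIsWordTok t && pvIsCont ch) = false ∧ (t == "-" && ch == '>') = false ∧
    (t == "~" && ch == '=') = false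

theorem pvBStep_concat (front : List String) (t : String) (ch : Char) :
    pvBStep (front ++ [t]) ch =
      if pvIsWordTok t && pvIsCont ch then front ++ [t.push ch]
      else if (t == "-" && ch == '>') || (t == "~" && ch == '=') then front ++ [t.push ch]
      else (front ++ [t]) ++ [String.ofList [ch]] := by
  unfold pvBStep
  rw [List.getLast?_concat]
  simp

theorem pvBStep_inert (acc : List String) (ch : Char) (r : List Char)
    (h : pvInert acc (ch :: r)) : pvBStep acc ch = acc ++ [String.ofList [ch]] := by
  unfold pvBStep
  cases hl : acc.getLast? with
  | none => rfl
  | some t =>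
    obtain ⟨h1, h2, h3⟩ := h t ch r hl rfl
    simp [h1, h2, h3]

theorem pvWordTok_push (w : String) (ch : Char) (hw : pvIsWordTok w = true) :
    pvIsWordTok (w.push ch) = true := by
  unfold pvIsWordTok at hw ⊢
  cases hl : w.toList with
  | nil => rw [hl] at hw; simp at hw
  | cons a t => rw [hl] at hw; simp [String.toList_push, hl]; simpa using hw

theorem pvWordTok_ne (w : String) (hw : pvIsWordTok w = true) :
    (w == "-") = false ∧ (w == "~") = false := by
  constructor <;> (rw [beq_eq_false_iff_ne]; intro he; subst he; revert hw; decide)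

theorem pvAbsorb (u : List Char) (front : List String) (w : String)
    (hw : pvIsWordTok w = true) :
    List.foldl pvBStep (front ++ [w]) u =
      List.foldl pvBStep (front ++ [String.ofList (w.toList ++ u.takeWhile pvIsCont)])
        (u.dropWhile pvIsCont) := by
  induction u generalizing front w with
  | nil => simp
  | cons ch u' ih =>
    cases hc : pvIsCont ch with
    | true =>
      rw [List.foldl_cons, pvBStep_concat, if_pos (by simp [hw, hc]),
        ih front (w.push ch) (pvWordTok_push w ch hw)]
      simp [String.toList_push, hc]
    | false =>
      simp [hc]

theorem pvFoldl_tok (s : List Char) (acc : List String) (hin : pvInert acc s) :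
    List.foldl pvBStep acc s = acc ++ pvTok s := by
  match s with
  | [] => simp [pvTok]
  | ch :: rest =>
    rw [List.foldl_cons, pvBStep_inert acc ch rest hin]
    by_cases ha : pvIsAlpha ch = true
    · have hw : pvIsWordTok (String.ofList [ch]) = true := by
        unfold pvIsWordTok; simp [ha]
      rw [pvAbsorb rest acc (String.ofList [ch]) hw]
      have hin' : pvInert (acc ++ [String.ofList ((String.ofList [ch]).toList ++ rest.takeWhile pvIsCont)])
          (rest.dropWhile pvIsCont) := by
        intro t d r hlast hcons
        rw [List.getLast?_concat] at hlast
        injection hlast with hlast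
        subst hlast
        have hwt : pvIsWordTok (String.ofList ((String.ofList [ch]).toList ++ rest.takeWhile pvIsCont)) = true := by
          unfold pvIsWordTok; simp [ha]
        have hd : pvIsCont d = false := by
          have h0 := List.head?_dropWhile_not pvIsCont rest
          rw [hcons] at h0; simpa using h0
        exact ⟨by rw [hd, Bool.and_false], by rw [(pvWordTok_ne _ hwt).1, Bool.false_and],
          by rw [(pvWordTok_ne _ hwt).2, Bool.false_and]⟩
      rw [pvFoldl_tok (rest.dropWhile pvIsCont) _ hin']
      simp [pvTok, ha]
    · by_cases h2 : ch = '-' ∧ rest.head? = some '>'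
      · obtain ⟨rfl, hh⟩ := h2
        cases rest with
        | nil => simp at hh
        | cons d r =>
          have hd : d = '>' := by simpa using hh
          subst hd
          rw [List.foldl_cons]
          have e1 : (pvIsWordTok (String.ofList ['-']) && pvIsCont '>') = false := by decide
          have e2 : ((String.ofList ['-'] == "-") && ('>' == '>')
              || (String.ofList ['-'] == "~") && ('>' == '=')) = true := by decide
          have e3 : (String.ofList ['-']).push '>' = "->" := by decide
          rw [pvBStep_concat, if_neg (by simp [e1]), if_pos (by simp [e2]), e3,
            pvFoldl_tok r (acc ++ ["->"]) ?_]
          · simp [pvTok, ha]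
          · intro t d' r' hlast hcons
            rw [List.getLast?_concat] at hlast
            injection hlast with hlast
            subst hlast
            exact ⟨by simp [show pvIsWordTok "->" = false from by decide],
              by simp [show ("->" == "-") = false from by decide],
              by simp [show ("->" == "~") = false from by decide]⟩
      · by_cases h3 : ch = '~' ∧ rest.head? = some '='
        · obtain ⟨rfl, hh⟩ := h3
          cases rest with
          | nil => simp at hh
          | cons d r =>
            have hd : d = '=' := by simpa using hh
            subst hd
            rw [List.foldl_cons]
            have e1 : (pvIsWordTok (String.ofList ['~']) && pvIsCont '=') = false := by decide
            have e2 : ((String.ofList ['~'] == "-") && ('=' == '>')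
                || (String.ofList ['~'] == "~") && ('=' == '=')) = true := by decide
            have e3 : (String.ofList ['~']).push '=' = "~=" := by decide
            rw [pvBStep_concat, if_neg (by simp [e1]), if_pos (by simp [e2]), e3,
              pvFoldl_tok r (acc ++ ["~="]) ?_]
            · simp [pvTok, ha, h2]
            · intro t d' r' hlast hcons
              rw [List.getLast?_concat] at hlast
              injection hlast with hlast
              subst hlast
              exact ⟨by simp [show pvIsWordTok "~=" = false from by decide],
                by simp [show ("~=" == "-") = false from by decide],
                by simp [show ("~=" == "~") = false from by decide]⟩
        · have hin' : pvInert (acc ++ [String.ofList [ch]]) rest := by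
            intro t d r hlast hcons
            rw [List.getLast?_concat] at hlast
            injection hlast with hlast
            subst hlast
            refine ⟨?_, ?_, ?_⟩
            · unfold pvIsWordTok
              simp [ha]
            · rw [Bool.and_eq_false_iff]
              by_cases hch : ch = '-'
              · subst hch
                right; rw [beq_eq_false_iff_ne]
                intro hg; subst hg
                exact h2 ⟨rfl, by rw [hcons]; rfl⟩
              · left; rw [beq_eq_false_iff_ne]
                intro he
                have h4 := congrArg String.toList he
                simp at h4
                exact hch h4
            · rw [Bool.and_eq_false_iff]
              by_cases hch : ch = '~'
              · subst hch
                right; rw [beq_eq_false_iff_ne]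
                intro hg; subst hg
                exact h3 ⟨rfl, by rw [hcons]; rfl⟩
              · left; rw [beq_eq_false_iff_ne]
                intro he
                have h4 := congrArg String.toList he
                simp at h4
                exact hch h4
          rw [pvFoldl_tok rest (acc ++ [String.ofList [ch]]) hin']
          simp [pvTok, ha, h2, h3]
termination_by s.length
decreasing_by
  all_goals first
    | exact Nat.lt_succ_of_le (List.length_dropWhile_le _ _)
    | (subst_vars; simp; try omega)
    | simp

-- ===== VERDICT (by name: the statement is the Claim_ definition above) =====
theorem tokenize_cont_spec : Claim_equal_tokenize_cont := by
  intro c _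
  unfold Spec_tokenize_cont tokenize_cont tokenize_cont_alt
  rw [pvALoop_eq_tok c.toList 0, pvFoldl_tok c.toList [] (by intro t ch r h hc; simp at h)]
  simp
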